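-- pv_equiv track=rewrite | github.com/nathanjrussell/math_code | groups/create_truth_tables.py | list_2_num
-- ===== SOURCE A (Python) =====
-- def list_2_num(a,map_list):
-- 	running_product = 1
-- 	number = a[0]
-- 	map_length = len(map_list)
-- 	for map_position in range(1,map_length):
-- 		running_product *= map_list[map_position-1]
-- 		number += a[map_position]*running_product
--
-- 	return number
-- ===== SOURCE B (Python) =====
-- def list_2_num(a, map_list):
--     m = len(map_list)
--     if m == 0:
--         return a[0]
--     number = a[m - 1]
--     for i in range(m - 1, 0, -1):
--         number = number * map_list[i - 1] + a[i - 1]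
--     return number
-- ===== Notes on version B (the rewrite author's own statement) =====
-- stated objective: alternative
-- what changed: Replaces A's forward pass that maintains a running product of radices with Horner's method: a single backward accumulator evaluating the same mixed-radix polynomial from the high digit down, no product variable.
import Mathlib
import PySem

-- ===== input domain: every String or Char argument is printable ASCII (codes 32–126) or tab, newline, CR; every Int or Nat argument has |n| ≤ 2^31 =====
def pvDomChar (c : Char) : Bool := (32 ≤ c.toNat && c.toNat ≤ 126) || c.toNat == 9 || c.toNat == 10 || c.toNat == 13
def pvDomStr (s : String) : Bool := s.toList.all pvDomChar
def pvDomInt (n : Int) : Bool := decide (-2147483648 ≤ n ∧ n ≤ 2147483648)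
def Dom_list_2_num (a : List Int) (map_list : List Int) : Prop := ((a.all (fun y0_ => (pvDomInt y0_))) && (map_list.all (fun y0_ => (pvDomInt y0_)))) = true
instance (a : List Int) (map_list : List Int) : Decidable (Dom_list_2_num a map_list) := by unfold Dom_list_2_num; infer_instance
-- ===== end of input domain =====

-- B replaces A's forward running-product pass with Horner's method (backward accumulator); alternative decomposition, same cost.


-- ===== PORT A =====
-- forward pass: state (running_product, number), number = a[0] seed
def list_2_num (a : List Int) (map_list : List Int) : Int :=
  let st := (PySem.List.pyRange 1 (map_list.length : Int) 1).foldl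
    (fun (s : Int × Int) i =>
      let rp := s.1 * PySem.List.pyGetD map_list (i - 1) 0
      (rp, s.2 + PySem.List.pyGetD a i 0 * rp))
    (1, PySem.List.pyGetD a 0 0)
  st.2

-- ===== PORT B =====
-- Horner's method from the high digit down
def list_2_num_alt (a : List Int) (map_list : List Int) : Int :=
  let m : Int := (map_list.length : Int)
  if m = 0 then PySem.List.pyGetD a 0 0
  else
    (PySem.List.pyRange (m - 1) 0 (-1)).foldl
      (fun n i => n * PySem.List.pyGetD map_list (i - 1) 0 + PySem.List.pyGetD a (i - 1) 0)
      (PySem.List.pyGetD a (m - 1) 0)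

-- ===== PRECONDITION & SPEC =====
-- Python A raises IndexError when a is empty (a[0]) or shorter than map_list (a[map_position]); exactly those inputs are excluded.
def Pre_list_2_num (a : List Int) (map_list : List Int) : Prop :=
  a ≠ [] ∧ map_list.length ≤ a.length
instance (a : List Int) (map_list : List Int) : Decidable (Pre_list_2_num a map_list) := by unfold Pre_list_2_num; infer_instance
def pvWitness_list_2_num : List Int × List Int := ([3, 1, 2], [4, 5, 6])

def Spec_list_2_num (a : List Int) (map_list : List Int) (out : Int) : Prop := out = list_2_num_alt a map_list
instance (a : List Int) (map_list : List Int) (out : Int) : Decidable (Spec_list_2_num a map_list out) := by unfold Spec_list_2_num; infer_instance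

-- ===== CLAIM (what is proved, stated in full; the proofs are below) =====
def Claim_equal_list_2_num : Prop := ∀ (a : List Int) (map_list : List Int), Dom_list_2_num a map_list → Pre_list_2_num a map_list → Spec_list_2_num a map_list (list_2_num a map_list)

-- ===== LEMMAS AND PROOFS =====

-- product of the first t radices
def pvProd (ml : List Int) : Nat → Int
  | 0 => 1
  | t + 1 => pvProd ml t * PySem.List.pyGetD ml (t : Int) 0

-- mixed-radix value of the first j digits
def pvS (a ml : List Int) : Nat → Int
  | 0 => 0
  | j + 1 => pvS a ml j + PySem.List.pyGetD a (j : Int) 0 * pvProd ml j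

theorem loopA (a ml : List Int) (t : Nat) :
    (PySem.List.pyRange 1 ((t : Int) + 1) 1).foldl
      (fun (s : Int × Int) i =>
        let rp := s.1 * PySem.List.pyGetD ml (i - 1) 0
        (rp, s.2 + PySem.List.pyGetD a i 0 * rp))
      (1, PySem.List.pyGetD a 0 0)
    = (pvProd ml t, pvS a ml (t + 1)) := by
  induction t with
  | zero =>
    rw [PySem.List.pyRange_one_eq_nil (by norm_num)]
    simp [pvProd, pvS]
  | succ t ih =>
    push_cast
    rw [PySem.List.pyRange_one_succ_right (by omega), List.foldl_append, ih]
    simp only [List.foldl_cons, List.foldl_nil]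
    have h1 : ((t : Int) + 1) - 1 = (t : Int) := by ring
    rw [h1]
    simp only [pvS, pvProd, Prod.mk.injEq]
    refine ⟨trivial, ?_⟩
    push_cast
    ring

theorem loopB (a ml : List Int) (i : Nat) (n : Int) :
    (PySem.List.pyRange (i : Int) 0 (-1)).foldl
      (fun n j => n * PySem.List.pyGetD ml (j - 1) 0 + PySem.List.pyGetD a (j - 1) 0) n
    = n * pvProd ml i + pvS a ml i := by
  induction i generalizing n with
  | zero =>
    rw [PySem.List.pyRange_neg_one_eq_nil (by norm_num)]
    simp [pvProd, pvS]
  | succ i ih =>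
    rw [PySem.List.pyRange_neg_one_cons (by positivity)]
    simp only [List.foldl_cons]
    have h1 : ((i : Int) + 1) - 1 = (i : Int) := by ring
    push_cast
    rw [h1, ih]
    simp [pvProd, pvS]
    ring

-- ===== VERDICT (by name: the statement is the Claim_ definition above) =====
theorem list_2_num_spec : Claim_equal_list_2_num := by
  intro a ml _ _
  show list_2_num a ml = list_2_num_alt a ml
  unfold list_2_num list_2_num_alt
  cases hml : ml.length with
  | zero =>
    rw [PySem.List.pyRange_one_eq_nil (by norm_num)]
    simp
  | succ k =>
    have hz : ((k : Int) + 1) ≠ 0 := by positivity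
    push_cast
    rw [if_neg hz, loopA a ml k]
    have h1 : ((k : Int) + 1) - 1 = (k : Int) := by ring
    rw [h1, loopB a ml k]
    simp [pvS]
    ring
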